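-- pv_equiv track=rewrite | github.com/ErikPetkov/course_fundamentals_python_2024 | functions_exercise/g_7_min_max_and_sum.py | min_max_sun
-- ===== SOURCE A (Python) =====
-- def min_max_sun(list):
--     int_list = []
--     for i in list:
--         int_list.append(int(i))
--     max_num = max(int_list)
--     min_num = min(int_list)
--     sumed = sum(int_list)
--     return max_num, min_num, sumed
-- ===== SOURCE B (Python) =====
-- def min_max_sun(list):
--     mx = mn = sm = int(list[0])
--     for i in list[1:]:
--         v = int(i)
--         if v > mx:
--             mx = v
--         if v < mn:
--             mn = v
--         sm += v
--     return mx, mn, sm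
-- ===== Notes on version B (the rewrite author's own statement) =====
-- stated objective: alternative
-- what changed: Replaces the build-a-converted-copy-then-three-library-scans (max, min, sum) structure with a single manual pass maintaining running max/min/sum, with no intermediate list.
import Mathlib
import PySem

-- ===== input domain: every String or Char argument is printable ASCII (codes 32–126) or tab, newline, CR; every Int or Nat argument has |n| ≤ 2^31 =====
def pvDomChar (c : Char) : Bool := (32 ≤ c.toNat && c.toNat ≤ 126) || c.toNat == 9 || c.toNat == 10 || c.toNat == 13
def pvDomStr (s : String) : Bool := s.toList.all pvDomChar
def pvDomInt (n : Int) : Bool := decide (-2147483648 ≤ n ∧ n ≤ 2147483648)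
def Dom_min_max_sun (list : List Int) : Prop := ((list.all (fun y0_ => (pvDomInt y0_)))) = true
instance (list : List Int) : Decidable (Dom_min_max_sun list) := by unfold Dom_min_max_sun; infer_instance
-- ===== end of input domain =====

-- B is a single manual pass keeping running max/min/sum instead of building a converted
-- copy and scanning it three times with max/min/sum; same return value on nonempty lists.

-- ===== PORT A =====
def min_max_sun (list : List Int) : Int × Int × Int :=
  -- int_list = []; for i in list: int_list.append(int(i))   (int(i) on an int is i)
  let int_list := list.foldl (fun acc i => acc ++ [i]) []
  match PySem.List.max? int_list (fun y => y), PySem.List.min? int_list (fun y => y) with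
  | some max_num, some min_num => (max_num, min_num, int_list.sum)
  | _, _ => (0, 0, 0)  -- unreachable: max()/min() raise ValueError on empty, excluded by Pre_

-- ===== PORT B =====
def min_max_sun_alt (list : List Int) : Int × Int × Int :=
  match list with
  | [] => (0, 0, 0)  -- unreachable: list[0] raises IndexError, excluded by Pre_
  | x :: rest =>
    rest.foldl (fun (s : Int × Int × Int) i =>
      let v := i
      let mx := if v > s.1 then v else s.1
      let mn := if v < s.2.1 then v else s.2.1
      (mx, mn, s.2.2 + v)) (x, x, x)

-- ===== PRECONDITION & SPEC =====
-- A raises ValueError on the empty list (max of empty sequence); excluded.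
def Pre_min_max_sun (list : List Int) : Prop := list ≠ []
instance (list : List Int) : Decidable (Pre_min_max_sun list) := by unfold Pre_min_max_sun; infer_instance
def pvWitness_min_max_sun : List Int := [3, -1, 2]
def Spec_min_max_sun (list : List Int) (out : Int × Int × Int) : Prop := out = min_max_sun_alt list
instance (list : List Int) (out : Int × Int × Int) : Decidable (Spec_min_max_sun list out) := by unfold Spec_min_max_sun; infer_instance

-- ===== CLAIM (what is proved, stated in full; the proofs are below) =====
def Claim_equal_min_max_sun : Prop := ∀ (list : List Int), Dom_min_max_sun list → Pre_min_max_sun list → Spec_min_max_sun list (min_max_sun list)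

-- ===== LEMMAS AND PROOFS =====

theorem pv_foldl_append_id (l acc : List Int) :
    l.foldl (fun acc i => acc ++ [i]) acc = acc ++ l := by
  induction l generalizing acc with
  | nil => simp
  | cons x t ih => simp [List.foldl, ih]

theorem pv_alt_fold (t : List Int) (mx mn sm : Int) :
    t.foldl (fun (s : Int × Int × Int) i =>
      let v := i
      let a := if v > s.1 then v else s.1
      let b := if v < s.2.1 then v else s.2.1
      (a, b, s.2.2 + v)) (mx, mn, sm)
    = (t.foldl max mx, t.foldl min mn, sm + t.sum) := by
  induction t generalizing mx mn sm with
  | nil => simp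
  | cons x t ih =>
    have h1 : (if x > mx then x else mx) = max mx x := by
      simp only [max_def]; split_ifs <;> omega
    have h2 : (if x < mn then x else mn) = min mn x := by
      simp only [min_def]; split_ifs <;> omega
    simp only [List.foldl, ih, h1, h2, List.sum_cons]
    ring_nf

-- ===== VERDICT (by name: the statement is the Claim_ definition above) =====
theorem min_max_sun_spec : Claim_equal_min_max_sun := by
  intro list _ hpre
  unfold Spec_min_max_sun min_max_sun min_max_sun_alt
  match list with
  | [] => exact absurd rfl hpre
  | x :: t =>
    simp only [pv_foldl_append_id, List.nil_append,
      PySem.List.max?_id_cons, PySem.List.min?_id_cons, pv_alt_fold]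
    simp [List.sum_cons]
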